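-- pv_equiv track=rewrite | github.com/AJAkil/security-tools | zip-file-brute-force/main.py | iterative_pass_generator
-- ===== SOURCE A (Python) =====
-- def iterative_pass_generator(length, charlist):
--     passwords = []
--
--     for current_length in range(length):
--         single_letters = [letter for letter in charlist]
--         for _ in range(current_length):
--             single_letters = [letter + char for char in charlist for letter in single_letters]
--
--         passwords += single_letters
--     return passwords
-- ===== SOURCE B (Python) =====
-- def iterative_pass_generator(length, charlist):
--     # Incremental single pass: carry the previous level and PREPEND each
--     # character (w slow, c fast), which reproduces A's append-based order.
--     passwords = []
--     level = ['']
--     for _ in range(length):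
--         level = [c + w for w in level for c in charlist]
--         passwords.extend(level)
--     return passwords
-- ===== Notes on version B (the rewrite author's own statement) =====
-- stated objective: faster
-- what changed: B carries a single incrementally extended level list across password lengths, prepending each character (word slow, char fast), instead of A rebuilding every length's list from charlist with repeated append passes.
import Mathlib
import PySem

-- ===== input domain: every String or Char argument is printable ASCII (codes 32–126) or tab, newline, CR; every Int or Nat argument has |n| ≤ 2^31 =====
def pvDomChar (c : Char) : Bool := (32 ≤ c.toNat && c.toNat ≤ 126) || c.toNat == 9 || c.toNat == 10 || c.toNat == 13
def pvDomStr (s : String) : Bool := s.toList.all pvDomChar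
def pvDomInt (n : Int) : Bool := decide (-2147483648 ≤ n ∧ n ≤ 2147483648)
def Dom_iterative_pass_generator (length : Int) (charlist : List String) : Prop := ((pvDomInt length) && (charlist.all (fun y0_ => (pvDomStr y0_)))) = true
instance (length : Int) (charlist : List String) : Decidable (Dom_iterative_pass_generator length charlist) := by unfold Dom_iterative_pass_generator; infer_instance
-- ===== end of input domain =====

-- B rebuilds each level once, prepending characters, instead of A's per-length rebuild from
-- charlist by repeated append passes; same return value, fewer passes (objective: faster).

-- ===== PORT A =====
-- literal port of A: for current_length in range(length), rebuild single_letters from charlist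
-- by current_length append passes, then passwords += single_letters
def iterative_pass_generator (length : Int) (charlist : List String) : List String :=
  (PySem.List.pyRange 0 length 1).foldl
    (fun passwords current_length =>
      let single_letters := charlist.map (fun letter => letter)
      let single_letters :=
        (PySem.List.pyRange 0 current_length 1).foldl
          (fun single_letters _ =>
            charlist.flatMap (fun char => single_letters.map (fun letter => letter ++ char)))
          single_letters
      passwords ++ single_letters)
    []

-- ===== PORT B =====
-- literal port of Source B: one carried level, extended by prepending, accumulated per round
def iterative_pass_generator_alt (length : Int) (charlist : List String) : List String :=
  ((PySem.List.pyRange 0 length 1).foldl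
    (fun (st : List String × List String) _ =>
      let level := st.2.flatMap (fun w => charlist.map (fun c => c ++ w))
      (st.1 ++ level, level))
    ([], [""])).1

-- ===== PRECONDITION & SPEC =====
def Spec_iterative_pass_generator (length : Int) (charlist : List String) (out : List String) : Prop := out = iterative_pass_generator_alt length charlist
instance (length : Int) (charlist : List String) (out : List String) : Decidable (Spec_iterative_pass_generator length charlist out) := by unfold Spec_iterative_pass_generator; infer_instance

-- ===== CLAIM (what is proved, stated in full; the proofs are below) =====
def Claim_equal_iterative_pass_generator : Prop := ∀ (length : Int) (charlist : List String), Dom_iterative_pass_generator length charlist → Spec_iterative_pass_generator length charlist (iterative_pass_generator length charlist)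

-- ===== LEMMAS AND PROOFS =====

-- A's inner pass: append each char after each existing letter (char slow, letter fast)
def pvAstep (cl : List String) (sl : List String) : List String :=
  cl.flatMap (fun char => sl.map (fun letter => letter ++ char))

-- B's level step: prepend each char before each existing word (word slow, char fast)
def pvBstep (cl : List String) (lv : List String) : List String :=
  lv.flatMap (fun w => cl.map (fun c => c ++ w))

lemma pvStep_comm (cl x : List String) :
    pvAstep cl (pvBstep cl x) = pvBstep cl (pvAstep cl x) := by
  simp [pvAstep, pvBstep, List.flatMap_map, List.map_flatMap, List.flatMap_assoc,
    Function.comp_def, String.append_assoc]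

lemma pvStep_base (cl : List String) : pvAstep cl [""] = pvBstep cl [""] := by
  simp [pvAstep, pvBstep, String.append_empty, String.empty_append]

lemma pvAstep_iterate_Bstep (cl x : List String) (n : ℕ) :
    (pvAstep cl)^[n] (pvBstep cl x) = pvBstep cl ((pvAstep cl)^[n] x) := by
  induction n generalizing x with
  | zero => rfl
  | succ n ih => rw [Function.iterate_succ_apply, pvStep_comm, ih, Function.iterate_succ_apply]

lemma pvIterate_empty (cl : List String) (n : ℕ) :
    (pvAstep cl)^[n] [""] = (pvBstep cl)^[n] [""] := by
  induction n with
  | zero => rfl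
  | succ n ih =>
    calc (pvAstep cl)^[n + 1] [""]
        = (pvAstep cl)^[n] (pvAstep cl [""]) := Function.iterate_succ_apply _ _ _
      _ = (pvAstep cl)^[n] (pvBstep cl [""]) := by rw [pvStep_base]
      _ = pvBstep cl ((pvAstep cl)^[n] [""]) := pvAstep_iterate_Bstep _ _ _
      _ = pvBstep cl ((pvBstep cl)^[n] [""]) := by rw [ih]
      _ = (pvBstep cl)^[n + 1] [""] := (Function.iterate_succ_apply' _ _ _).symm

lemma pvBstep_empty (cl : List String) : pvBstep cl [""] = cl := by
  simp [pvBstep, String.append_empty]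

-- A's length-(n+1) block equals B's level after n+1 steps
lemma pvBlock_eq (cl : List String) (n : ℕ) :
    (pvAstep cl)^[n] cl = (pvBstep cl)^[n + 1] [""] := by
  calc (pvAstep cl)^[n] cl
      = (pvAstep cl)^[n] (pvBstep cl [""]) := by rw [pvBstep_empty]
    _ = pvBstep cl ((pvAstep cl)^[n] [""]) := pvAstep_iterate_Bstep _ _ _
    _ = pvBstep cl ((pvBstep cl)^[n] [""]) := by rw [pvIterate_empty]
    _ = (pvBstep cl)^[n + 1] [""] := (Function.iterate_succ_apply' _ _ _).symm

-- both outer folds over range(n), jointly: B's state is (A's passwords, B^[n] [""])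
lemma pvOuter_eq (cl : List String) (n : ℕ) :
    (PySem.List.pyRange 0 (n : Int) 1).foldl
        (fun (st : List String × List String) _ =>
          let level := st.2.flatMap (fun w => cl.map (fun c => c ++ w))
          (st.1 ++ level, level))
        ([], [""]) =
      ((PySem.List.pyRange 0 (n : Int) 1).foldl
        (fun passwords current_length =>
          let single_letters := cl.map (fun letter => letter)
          let single_letters :=
            (PySem.List.pyRange 0 current_length 1).foldl
              (fun single_letters _ =>
                cl.flatMap (fun char => single_letters.map (fun letter => letter ++ char)))
              single_letters
          passwords ++ single_letters)
        [],
       (pvBstep cl)^[n] [""]) := by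
  induction n with
  | zero => simp [PySem.List.pyRange_one_eq_nil]
  | succ n ih =>
    have hc : ((n + 1 : ℕ) : Int) = (n : Int) + 1 := by push_cast; ring
    rw [hc, PySem.List.pyRange_one_succ_right (by positivity), List.foldl_append,
      List.foldl_append, ih]
    simp only [List.foldl_cons, List.foldl_nil]
    have hinner : (PySem.List.pyRange 0 (n : Int) 1).foldl
        (fun single_letters _ =>
          cl.flatMap (fun char => single_letters.map (fun letter => letter ++ char)))
        (cl.map (fun letter => letter)) = (pvAstep cl)^[n] cl := by
      rw [List.map_id']
      have := List.foldl_const (pvAstep cl) cl (PySem.List.pyRange 0 (n : Int) 1)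
      simp only [PySem.List.length_pyRange_one] at this
      simpa [pvAstep] using this
    rw [hinner, pvBlock_eq, Function.iterate_succ_apply']
    simp [pvBstep]

-- ===== VERDICT (by name: the statement is the Claim_ definition above) =====
theorem iterative_pass_generator_spec : Claim_equal_iterative_pass_generator := by
  intro length cl _
  unfold Spec_iterative_pass_generator iterative_pass_generator iterative_pass_generator_alt
  by_cases h : length ≤ 0
  · rw [PySem.List.pyRange_one_eq_nil h]; rfl
  · have hlen : length = ((length.toNat : ℕ) : Int) := by omega
    rw [hlen, pvOuter_eq]
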